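-- pv_equiv track=rewrite | github.com/qscf11-png/music-tab-finder | backend/tab_engine.py | detect_chord
-- ===== SOURCE A (Python) =====
-- CHORD_TEMPLATES = {
--     "C":  [0, 4, 7],
--     "Cm": [0, 3, 7],
--     "D":  [2, 6, 9],
--     "Dm": [2, 5, 9],
--     "E":  [4, 8, 11],
--     "Em": [4, 7, 11],
--     "F":  [5, 9, 0],
--     "Fm": [5, 8, 0],
--     "G":  [7, 11, 2],
--     "Gm": [7, 10, 2],
--     "A":  [9, 1, 4],
--     "Am": [9, 0, 4],
--     "B":  [11, 3, 6],
--     "Bm": [11, 2, 6],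
-- }
--
-- def detect_chord(notes: list[int]) -> str:
--     """
--     從一組同時發聲的音符中辨識和弦。
--
--     Args:
--         notes: MIDI 音符編號列表
--
--     Returns:
--         str: 和弦名稱（如 "Am", "G"）
--     """
--     if not notes:
--         return ""
--
--     pitch_classes = sorted(set(n % 12 for n in notes))
--
--     best_match = ""
--     best_score = 0
--
--     for chord_name, template in CHORD_TEMPLATES.items():
--         score = sum(1 for pc in pitch_classes if pc in template)
--         if score > best_score:
--             best_score = score
--             best_match = chord_name
--
--     return best_match if best_score >= 2 else ""
-- ===== SOURCE B (Python) =====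
-- CHORD_TEMPLATES = {
--     "C":  [0, 4, 7],
--     "Cm": [0, 3, 7],
--     "D":  [2, 6, 9],
--     "Dm": [2, 5, 9],
--     "E":  [4, 8, 11],
--     "Em": [4, 7, 11],
--     "F":  [5, 9, 0],
--     "Fm": [5, 8, 0],
--     "G":  [7, 11, 2],
--     "Gm": [7, 10, 2],
--     "A":  [9, 1, 4],
--     "Am": [9, 0, 4],
--     "B":  [11, 3, 6],
--     "Bm": [11, 2, 6],
-- }
--
-- # Inverted index, built once: pitch class -> names of the chords containing it.
-- _PITCH_TO_CHORDS = {
--     p: [name for name, t in CHORD_TEMPLATES.items() if p in t]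
--     for p in range(12)
-- }
--
-- def detect_chord(notes: list[int]) -> str:
--     if not notes:
--         return ""
--
--     scores = {name: 0 for name in CHORD_TEMPLATES}
--     for pc in sorted(set(n % 12 for n in notes)):
--         for name in _PITCH_TO_CHORDS[pc]:
--             scores[name] += 1
--
--     best = max(scores.values())
--     if best < 2:
--         return ""
--     for name, score in scores.items():
--         if score == best:
--             return name
--     return ""
-- ===== Notes on version B (the rewrite author's own statement) =====
-- stated objective: alternative
-- what changed: A rescans the pitch-class list once per chord template to compute each score; B precomputes an inverted index (pitch class -> chord names), accumulates all 14 scores in one pass of dict increments over the pitch classes, then takes max(scores.values()) and returns the first chord (in template order) attaining it if it is >= 2.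
import Mathlib
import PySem

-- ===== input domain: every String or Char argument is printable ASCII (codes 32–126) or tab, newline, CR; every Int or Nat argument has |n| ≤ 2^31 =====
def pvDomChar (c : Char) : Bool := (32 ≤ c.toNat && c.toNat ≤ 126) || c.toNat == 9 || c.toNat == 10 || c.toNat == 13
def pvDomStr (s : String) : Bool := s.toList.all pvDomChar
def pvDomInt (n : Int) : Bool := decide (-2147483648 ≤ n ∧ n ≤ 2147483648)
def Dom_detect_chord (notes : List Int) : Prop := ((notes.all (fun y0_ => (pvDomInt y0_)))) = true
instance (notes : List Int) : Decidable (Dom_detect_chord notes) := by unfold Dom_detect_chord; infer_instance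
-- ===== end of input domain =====

-- B replaces A's per-chord rescan of the pitch classes by a precomputed inverted index
-- (pitch class -> chord names), one pass of counter increments, then max + first-match scan
-- over the scores in template order (objective: alternative algorithm, same exact result).

-- ===== PORT A =====
-- CHORD_TEMPLATES (a dict iterated via .items(); insertion-ordered association list)
def chordTemplates : List (String × List Int) :=
  [("C",[0,4,7]),("Cm",[0,3,7]),("D",[2,6,9]),("Dm",[2,5,9]),("E",[4,8,11]),("Em",[4,7,11]),
   ("F",[5,9,0]),("Fm",[5,8,0]),("G",[7,11,2]),("Gm",[7,10,2]),("A",[9,1,4]),("Am",[9,0,4]),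
   ("B",[11,3,6]),("Bm",[11,2,6])]

def detect_chord (notes : List Int) : String :=
  if notes = [] then ""
  else
    let pitch_classes : List Int :=
      PySem.List.sorted (PySem.Set.ofList (notes.map (fun n => PySem.Int.mod n 12))) id
    let r := chordTemplates.foldl (fun (acc : String × Int) nt =>
      let score : Int := pitch_classes.foldl (fun s pc => if pc ∈ nt.2 then s + 1 else s) 0
      if score > acc.2 then (nt.1, score) else acc) ("", 0)
    if r.2 ≥ 2 then r.1 else ""

-- ===== PORT B =====
-- _PITCH_TO_CHORDS = {p: [name for name, t in CHORD_TEMPLATES.items() if p in t] for p in range(12)}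
def pitchToChords : PySem.Dict Int (List String) :=
  PySem.Dict.ofList ((PySem.List.pyRange 0 12 1).map (fun p =>
    (p, (chordTemplates.filter (fun nt => decide (p ∈ nt.2))).map (·.1))))

-- scores = {name: 0 for name in CHORD_TEMPLATES}
def initScores : PySem.Dict String Int :=
  chordTemplates.foldl (fun d nt => d.insert nt.1 0) PySem.Dict.empty

-- inner loop: for name in _PITCH_TO_CHORDS[pc]: scores[name] += 1
-- (getD with default []: every pc here is n % 12 ∈ [0, 12), always a key, so the
-- default is never used and the lookup is exact)
def bumpScores (d : PySem.Dict String Int) (pc : Int) : PySem.Dict String Int :=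
  (pitchToChords.getD pc []).foldl (fun d name => d.insert name (d.getD name 0 + 1)) d

def detect_chord_alt (notes : List Int) : String :=
  if notes = [] then ""
  else
    let pcs : List Int :=
      PySem.List.sorted (PySem.Set.ofList (notes.map (fun n => PySem.Int.mod n 12))) id
    let scores := pcs.foldl bumpScores initScores
    -- best = max(scores.values()); scores always has 14 entries, so the default is never used
    let best : Int := (PySem.List.max? scores.values id).getD 0
    if best < 2 then ""
    else ((scores.items.find? (fun p => p.2 == best)).map (·.1)).getD ""

-- ===== PRECONDITION & SPEC =====
def Spec_detect_chord (notes : List Int) (out : String) : Prop := out = detect_chord_alt notes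
instance (notes : List Int) (out : String) : Decidable (Spec_detect_chord notes out) := by unfold Spec_detect_chord; infer_instance

-- ===== CLAIM (what is proved, stated in full; the proofs are below) =====
def Claim_equal_detect_chord : Prop := ∀ (notes : List Int), Dom_detect_chord notes → Spec_detect_chord notes (detect_chord notes)

-- ===== LEMMAS AND PROOFS =====

-- A's best-so-far update step, extracted for the selection lemmas.
def selStep (acc x : String × Int) : String × Int := if x.2 > acc.2 then x else acc

-- running maximum of the scores (seeded with A's initial best_score)
def runMax (l : List (String × Int)) (b : Int) : Int := l.foldl (fun a x => max a x.2) b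

-- the per-chord score both programs arrive at
def cnt (pcs : List Int) (t : List Int) : Int := (pcs.countP (fun x => decide (x ∈ t)) : Int)

-- every pitch class 0..11 bumps exactly the chords whose template contains it
lemma count_pitchToChords (p : Int) (h0 : 0 ≤ p) (h1 : p < 12) :
    ∀ nt ∈ chordTemplates, ((pitchToChords.getD p []).count nt.1 : Int) =
      (if p ∈ nt.2 then 1 else 0) := by
  interval_cases p <;> decide

-- the scores dict after the bump loop: initial value plus the count of matching pitch classes
lemma getD_foldl_bumpScores (pcs : List Int) (hb : ∀ x ∈ pcs, 0 ≤ x ∧ x < 12) :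
    ∀ (d : PySem.Dict String Int), ∀ nt ∈ chordTemplates,
      (pcs.foldl bumpScores d).getD nt.1 0 = d.getD nt.1 0 + cnt pcs nt.2 := by
  induction pcs with
  | nil => intro d nt _; simp [cnt]
  | cons p t ih =>
    intro d nt h
    have hp := hb p (by simp)
    have hbt : ∀ x ∈ t, 0 ≤ x ∧ x < 12 := fun x hx => hb x (by simp [hx])
    rw [List.foldl_cons, ih hbt (bumpScores d p) nt h]
    have hbump : (bumpScores d p).getD nt.1 0 =
        d.getD nt.1 0 + ((pitchToChords.getD p []).count nt.1 : Int) :=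
      PySem.Dict.getD_foldl_insert_add_one (pitchToChords.getD p []) d nt.1
    rw [hbump, count_pitchToChords p hp.1 hp.2 nt h]
    simp only [cnt, List.countP_cons]
    by_cases hm : p ∈ nt.2
    · simp [hm]; ring
    · simp [hm]

-- the bump loop never adds a key: the keys stay CHORD_TEMPLATES' names in order
lemma keys_foldl_bumpScores (pcs : List Int) (hb : ∀ x ∈ pcs, 0 ≤ x ∧ x < 12) :
    (pcs.foldl bumpScores initScores).keys = chordTemplates.map (·.1) := by
  have hsub : ∀ p, 0 ≤ p → p < 12 →
      ∀ k ∈ pitchToChords.getD p [], k ∈ chordTemplates.map (·.1) := by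
    intro p h0 h1; interval_cases p <;> decide
  have hinit : initScores.keys = chordTemplates.map (·.1) := by decide
  suffices h : ∀ (d : PySem.Dict String Int), d.keys = chordTemplates.map (·.1) →
      (pcs.foldl bumpScores d).keys = chordTemplates.map (·.1) from h initScores hinit
  induction pcs with
  | nil => intro d hd; simpa using hd
  | cons p t ih =>
    intro d hd
    have hp := hb p (by simp)
    have hbt : ∀ x ∈ t, 0 ≤ x ∧ x < 12 := fun x hx => hb x (by simp [hx])
    rw [List.foldl_cons]
    refine ih hbt (bumpScores d p) ?_
    rw [bumpScores, PySem.Dict.keys_foldl_insert, PySem.Set.update_eq_append_filter, hd]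
    have : List.filter (fun y => !PySem.Set.contains (chordTemplates.map (·.1)) y)
        (PySem.Set.ofList (pitchToChords.getD p [])) = [] := by
      rw [List.filter_eq_nil_iff]
      intro k hk
      have hk' : k ∈ pitchToChords.getD p [] := (PySem.Set.mem_ofList _ _).mp hk
      have := hsub p hp.1 hp.2 k hk'
      simp [this]
    rw [this, List.append_nil]

-- selection: the second component of A's fold is the running maximum
lemma selStep_snd (l : List (String × Int)) : ∀ (bm : String) (b : Int),
    (l.foldl selStep (bm, b)).2 = runMax l b := by
  induction l with
  | nil => intro bm b; simp [runMax]
  | cons x t ih =>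
    intro bm b
    rw [List.foldl_cons, runMax, List.foldl_cons]
    by_cases h : x.2 > b
    · rw [selStep, if_pos h, max_eq_right (le_of_lt h), ← Prod.mk.eta (p := x)]
      exact ih x.1 x.2
    · rw [selStep, if_neg h, max_eq_left (by omega)]
      exact ih bm b

lemma sel_const (l : List (String × Int)) : ∀ (bm : String) (b : Int),
    (∀ x ∈ l, x.2 ≤ b) → l.foldl selStep (bm, b) = (bm, b) := by
  induction l with
  | nil => intro bm b _; rfl
  | cons x t ih =>
    intro bm b h
    rw [List.foldl_cons, selStep, if_neg (by have := h x (by simp); omega)]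
    exact ih bm b fun y hy => h y (by simp [hy])

lemma runMax_le (l : List (String × Int)) : ∀ (b : Int),
    b ≤ runMax l b ∧ ∀ x ∈ l, x.2 ≤ runMax l b := by
  intro b
  have h := PySem.List.le_foldl_max (l.map (·.2)) b
  rw [List.foldl_map] at h
  exact ⟨h.1, fun x hx => h.2 x.2 (List.mem_map_of_mem hx)⟩

lemma runMax_attained (l : List (String × Int)) : ∀ (b : Int), b < runMax l b →
    ∃ x ∈ l, x.2 = runMax l b := by
  induction l with
  | nil => intro b h; simp [runMax] at h
  | cons x t ih =>
    intro b h
    rw [runMax, List.foldl_cons] at h ⊢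
    by_cases hx : max b x.2 < runMax t (max b x.2)
    · obtain ⟨y, hy, hy2⟩ := ih (max b x.2) hx
      exact ⟨y, by simp [hy], hy2⟩
    · have h1 := (runMax_le t (max b x.2)).1
      have h2 : runMax t (max b x.2) = max b x.2 := le_antisymm (by omega) h1
      rw [runMax] at h2
      rw [h2] at h ⊢
      refine ⟨x, by simp, ?_⟩
      omega

-- A's fold returns the FIRST chord attaining the maximal score
lemma sel_first (l : List (String × Int)) : ∀ (bm : String) (b : Int), b < runMax l b →
    (l.foldl selStep (bm, b)).1 =
      ((l.find? (fun x => x.2 == runMax l b)).map (·.1)).getD bm := by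
  induction l with
  | nil => intro bm b h; simp [runMax] at h
  | cons x t ih =>
    intro bm b h
    have hM : runMax (x :: t) b = runMax t (max b x.2) := by rw [runMax, List.foldl_cons]; rfl
    rw [List.foldl_cons]
    by_cases hx : b < x.2
    · rw [selStep, if_pos (by omega)]
      have hmax : max b x.2 = x.2 := max_eq_right (le_of_lt hx)
      by_cases ht : x.2 < runMax t x.2
      · have hMt : runMax (x :: t) b = runMax t x.2 := by rw [hM, hmax]
        have hne : ¬ ((fun y => y.2 == runMax (x :: t) b) x = true) := by
          rw [hMt]; simp; omega
        have hfind : List.find? (fun y => y.2 == runMax (x :: t) b) (x :: t) =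
            List.find? (fun y => y.2 == runMax (x :: t) b) t := List.find?_cons_of_neg hne
        rw [hfind, hMt]
        have hih := ih x.1 x.2 ht
        rw [← Prod.mk.eta (p := x)]
        rw [hih]
        obtain ⟨y, hy, hy2⟩ := runMax_attained t x.2 ht
        have hsome : (List.find? (fun y => y.2 == runMax t x.2) t).isSome :=
          List.find?_isSome.mpr ⟨y, hy, by simp [hy2]⟩
        obtain ⟨z, hz⟩ := Option.isSome_iff_exists.mp hsome
        rw [hz]
        simp
      · have h1 := (runMax_le t x.2).1
        have h2 : runMax t x.2 = x.2 := le_antisymm (by omega) h1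
        have hMt : runMax (x :: t) b = x.2 := by rw [hM, hmax, h2]
        rw [sel_const t x.1 x.2 (by
          intro y hy
          have := (runMax_le t x.2).2 y hy
          omega)]
        have hpos : ((fun y => y.2 == runMax (x :: t) b) x = true) := by simp [hMt]
        have hfind : List.find? (fun y => y.2 == runMax (x :: t) b) (x :: t) = some x :=
          List.find?_cons_of_pos hpos
        rw [hfind]
        simp
    · rw [selStep, if_neg (by omega)]
      have hmax : max b x.2 = b := max_eq_left (by omega)
      have hMt : runMax (x :: t) b = runMax t b := by rw [hM, hmax]
      have hbM : b < runMax t b := by rw [hMt] at h; exact h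
      have hne : ¬ ((fun y => y.2 == runMax (x :: t) b) x = true) := by
        rw [hMt]; simp; omega
      have hfind : List.find? (fun y => y.2 == runMax (x :: t) b) (x :: t) =
          List.find? (fun y => y.2 == runMax (x :: t) b) t := List.find?_cons_of_neg hne
      rw [hfind, hMt]
      exact ih bm b hbM

-- Python max() over the (nonempty, nonnegative) score values is the running maximum from 0
lemma max?_getD_eq_runMax (l : List (String × Int)) (hne : l ≠ [])
    (h0 : ∀ x ∈ l, 0 ≤ x.2) :
    (PySem.List.max? (l.map (·.2)) id).getD 0 = runMax l 0 := by
  cases hm : PySem.List.max? (l.map (·.2)) id with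
  | none =>
    have := (PySem.List.max?_eq_none_iff (l.map (·.2)) id).mp hm
    simp at this
    exact absurd this hne
  | some m =>
    have hmem : m ∈ l.map (·.2) := PySem.List.max?_mem hm
    have hub : ∀ y ∈ l.map (·.2), y ≤ m := fun y hy => PySem.List.max?_isMax hm y hy
    obtain ⟨x, hx, rfl⟩ := List.mem_map.mp hmem
    have hle := runMax_le l 0
    have hxle : x.2 ≤ runMax l 0 := hle.2 x hx
    simp only [Option.getD_some]
    by_cases hpos : 0 < runMax l 0
    · obtain ⟨y, hy, hy2⟩ := runMax_attained l 0 hpos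
      have := hub y.2 (List.mem_map_of_mem hy)
      omega
    · have := hle.1
      have := h0 x hx
      omega

-- A's chord loop is the best-so-far fold over the (name, score) pairs
lemma foldA_eq_selfold (pcs : List Int) :
    chordTemplates.foldl (fun (acc : String × Int) nt =>
        if pcs.foldl (fun s pc => if pc ∈ nt.2 then s + 1 else s) 0 > acc.2
        then (nt.1, pcs.foldl (fun s pc => if pc ∈ nt.2 then s + 1 else s) 0) else acc) ("", 0)
      = (chordTemplates.map (fun nt => (nt.1, cnt pcs nt.2))).foldl selStep ("", 0) := by
  rw [List.foldl_map]
  apply PySem.List.foldl_congr_mem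
  intro acc nt _
  rw [selStep, PySem.List.foldl_ite_add_one, zero_add]
  rfl

-- ===== VERDICT (by name: the statement is the Claim_ definition above) =====
theorem detect_chord_spec : Claim_equal_detect_chord := by
  intro notes _
  unfold Spec_detect_chord detect_chord detect_chord_alt
  by_cases hn : notes = []
  · simp [hn]
  · simp only [if_neg hn]
    set pcs : List Int :=
      PySem.List.sorted (PySem.Set.ofList (notes.map (fun n => PySem.Int.mod n 12))) id with hpcs
    have hb : ∀ x ∈ pcs, 0 ≤ x ∧ x < 12 := by
      intro x hx
      rw [hpcs, PySem.List.mem_sorted, PySem.Set.mem_ofList] at hx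
      obtain ⟨n, -, rfl⟩ := List.mem_map.mp hx
      exact ⟨PySem.Int.mod_nonneg n (by norm_num), PySem.Int.mod_lt n (by norm_num)⟩
    have init0 : ∀ nt ∈ chordTemplates, initScores.getD nt.1 0 = 0 := by decide
    have hkeys := keys_foldl_bumpScores pcs hb
    have hnd : (pcs.foldl bumpScores initScores).keys.Nodup := by rw [hkeys]; decide
    have hitems : (pcs.foldl bumpScores initScores).items
        = chordTemplates.map (fun nt => (nt.1, cnt pcs nt.2)) := by
      rw [PySem.Dict.items_eq_map_keys _ hnd 0, hkeys, List.map_map]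
      refine List.map_congr_left ?_
      intro nt hnt
      simp only [Function.comp_apply]
      rw [getD_foldl_bumpScores pcs hb initScores nt hnt, init0 nt hnt, zero_add]
    have hvalues : (pcs.foldl bumpScores initScores).values
        = (chordTemplates.map (fun nt => (nt.1, cnt pcs nt.2))).map (·.2) := by
      rw [PySem.Dict.values_eq_map_keys _ hnd 0, hkeys, List.map_map, List.map_map]
      refine List.map_congr_left ?_
      intro nt hnt
      simp only [Function.comp_apply]
      rw [getD_foldl_bumpScores pcs hb initScores nt hnt, init0 nt hnt, zero_add]
    have hLne : chordTemplates.map (fun nt => (nt.1, cnt pcs nt.2)) ≠ [] := by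
      simp [chordTemplates]
    have hL0 : ∀ x ∈ chordTemplates.map (fun nt => (nt.1, cnt pcs nt.2)), 0 ≤ x.2 := by
      intro x hx
      obtain ⟨nt, -, rfl⟩ := List.mem_map.mp hx
      exact Int.natCast_nonneg _
    rw [foldA_eq_selfold pcs, hitems, hvalues,
      max?_getD_eq_runMax _ hLne hL0,
      selStep_snd (chordTemplates.map (fun nt => (nt.1, cnt pcs nt.2))) "" 0]
    by_cases h2 : runMax (chordTemplates.map (fun nt => (nt.1, cnt pcs nt.2))) 0 < 2
    · rw [if_neg (by omega), if_pos h2]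
    · rw [if_pos (by omega), if_neg h2,
        sel_first (chordTemplates.map (fun nt => (nt.1, cnt pcs nt.2))) "" 0 (by omega)]
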